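-- pv_equiv track=rewrite | github.com/Theo-Tchilinguirian/Python-training | Interesting stuff/Fun functions.py | CompteurMotsLettres
-- ===== SOURCE A (Python) =====
-- def CompteurMotsLettres(string):
--     """
--     string: une chaine de caractères
--     Renvoie un tuple de valeurs: (nombre de mots, liste du nombre de lettres par mot)
--     """
--     liste = [0]
--     i = 0
--     for lettre in string:
--         if lettre is not ' ':
--             liste[i] += 1
--         else:
--             liste.append(0)
--             i += 1
--     return i+1, liste
-- ===== SOURCE B (Python) =====
-- def CompteurMotsLettres(string):
--     """
--     string: une chaine de caractères
--     Renvoie un tuple de valeurs: (nombre de mots, liste du nombre de lettres par mot)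
--     """
--     words = string.split(' ')
--     return len(words), [len(w) for w in words]
-- ===== Notes on version B (the rewrite author's own statement) =====
-- stated objective: idiomatic
-- what changed: B delegates word segmentation to str.split on a single-space separator and maps len over the resulting word list, instead of A's character-by-character loop maintaining an index and a mutable per-word counter list.
import Mathlib
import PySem

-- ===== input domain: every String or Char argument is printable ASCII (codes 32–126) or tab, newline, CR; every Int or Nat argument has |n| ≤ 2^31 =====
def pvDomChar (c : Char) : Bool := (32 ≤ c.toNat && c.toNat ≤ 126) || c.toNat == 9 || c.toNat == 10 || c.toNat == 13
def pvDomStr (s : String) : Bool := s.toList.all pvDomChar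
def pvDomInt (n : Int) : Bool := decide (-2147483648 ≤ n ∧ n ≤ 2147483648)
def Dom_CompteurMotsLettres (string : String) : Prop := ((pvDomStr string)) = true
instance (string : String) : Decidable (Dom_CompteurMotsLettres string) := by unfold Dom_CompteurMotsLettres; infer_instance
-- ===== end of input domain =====

-- B splits on ' ' and maps len over the words (idiomatic); A walks character by character with an index and a counter list.

-- ===== PORT A =====
-- one step of A's for-loop: state is (liste, i)
def CompteurMotsLettresStep (st : List Int × Nat) (lettre : Char) : List Int × Nat :=
  if lettre ≠ ' ' then (st.1.set st.2 (st.1.getD st.2 0 + 1), st.2)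
  else (st.1 ++ [0], st.2 + 1)

def CompteurMotsLettres (string : String) : Int × List Int :=
  let st := string.toList.foldl CompteurMotsLettresStep ([0], 0)
  ((st.2 : Int) + 1, st.1)

-- ===== PORT B =====
-- words = string.split(' '); return (len(words), [len(w) for w in words])
-- List.splitOn ' ' is exact for Python's str.split with a single-char separator (empty segments kept, '' ↦ ['']).
def CompteurMotsLettres_alt (string : String) : Int × List Int :=
  let words := string.toList.splitOn ' '
  ((words.length : Int), words.map (fun w => (w.length : Int)))

-- ===== PRECONDITION & SPEC =====
def Spec_CompteurMotsLettres (string : String) (out : Int × List Int) : Prop := out = CompteurMotsLettres_alt string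
instance (string : String) (out : Int × List Int) : Decidable (Spec_CompteurMotsLettres string out) := by unfold Spec_CompteurMotsLettres; infer_instance

-- ===== CLAIM (what is proved, stated in full; the proofs are below) =====
def Claim_equal_CompteurMotsLettres : Prop := ∀ (string : String), Dom_CompteurMotsLettres string → Spec_CompteurMotsLettres string (CompteurMotsLettres string)

-- ===== LEMMAS AND PROOFS =====

-- letter counts of the words of cs, as B computes them
def pvSegs (cs : List Char) : List Int :=
  (cs.splitOn ' ').map (fun w => (w.length : Int))

-- add n to the head letter count
def pvBump (n : Int) : List Int → List Int
  | [] => [n]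
  | x :: xs => (n + x) :: xs

theorem pvSplitOn_ne_nil (cs : List Char) : cs.splitOn ' ' ≠ [] := by
  induction cs with
  | nil => simp [List.splitOn, List.splitOnP_nil]
  | cons c cs ih =>
    rw [List.splitOn, List.splitOnP_cons]
    split
    · simp
    · rw [← List.splitOn]
      cases h : cs.splitOn ' ' with
      | nil => exact absurd h ih
      | cons a l => simp [h]

theorem pvSegs_ne_nil (cs : List Char) : pvSegs cs ≠ [] := by
  simp [pvSegs, pvSplitOn_ne_nil]

theorem pvSet_last (acc : List Int) (n v : Int) :
    (acc ++ [n]).set acc.length v = acc ++ [v] := by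
  induction acc with
  | nil => rfl
  | cons a l ih => simp [List.set, ih]

theorem pvGetD_last (acc : List Int) (n : Int) :
    (acc ++ [n]).getD acc.length 0 = n := by
  induction acc with
  | nil => rfl
  | cons a l ih => simpa [List.getD] using ih

theorem pvBump_bump (n : Int) (l : List Int) :
    pvBump n (pvBump 1 l) = pvBump (n + 1) l := by
  cases l <;> simp [pvBump] <;> ring

theorem pvSegs_cons_space (cs : List Char) :
    pvSegs (' ' :: cs) = 0 :: pvSegs cs := by
  simp [pvSegs, List.splitOn, List.splitOnP_cons]

theorem pvSegs_cons_nonspace (c : Char) (cs : List Char) (h : c ≠ ' ') :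
    pvSegs (c :: cs) = pvBump 1 (pvSegs cs) := by
  rw [pvSegs, List.splitOn, List.splitOnP_cons]
  simp only [beq_iff_eq, h, if_neg]
  rw [← List.splitOn]
  cases hs : cs.splitOn ' ' with
  | nil => exact absurd hs (pvSplitOn_ne_nil cs)
  | cons w ws => simp [pvSegs, hs, pvBump, List.modifyHead]; ring

theorem pvSplitOn_cons_space (cs : List Char) :
    (' ' :: cs).splitOn ' ' = [] :: cs.splitOn ' ' := by
  simp [List.splitOn, List.splitOnP_cons]

theorem pvSplitOn_cons_nonspace (c : Char) (cs : List Char) (h : c ≠ ' ') :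
    ((c :: cs).splitOn ' ').length = (cs.splitOn ' ').length := by
  rw [List.splitOn, List.splitOnP_cons]
  simp only [beq_iff_eq, h, if_neg]
  rw [← List.splitOn]
  cases hs : cs.splitOn ' ' with
  | nil => exact absurd hs (pvSplitOn_ne_nil cs)
  | cons w ws => simp [List.modifyHead]

-- loop invariant: the working list is a settled prefix plus the (still growing) current word count
theorem pvLoop (cs : List Char) : ∀ (acc : List Int) (n : Int),
    cs.foldl CompteurMotsLettresStep (acc ++ [n], acc.length) =
      (acc ++ pvBump n (pvSegs cs), acc.length + ((cs.splitOn ' ').length - 1)) := by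
  induction cs with
  | nil => intro acc n; simp [pvSegs, pvBump, List.splitOn, List.splitOnP_nil]
  | cons c cs ih =>
    intro acc n
    by_cases hc : c = ' '
    · subst hc
      rw [List.foldl_cons]
      have hstep : CompteurMotsLettresStep (acc ++ [n], acc.length) ' '
          = ((acc ++ [n]) ++ [0], (acc ++ [n]).length) := by
        simp [CompteurMotsLettresStep]
      rw [hstep, ih (acc ++ [n]) 0]
      have h1 : 1 ≤ (cs.splitOn ' ').length :=
        List.length_pos_of_ne_nil (pvSplitOn_ne_nil cs)
      rw [pvSegs_cons_space, pvSplitOn_cons_space]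
      cases hs : pvSegs cs with
      | nil => exact absurd hs (pvSegs_ne_nil cs)
      | cons x xs =>
        simp [pvBump]
        omega
    · rw [List.foldl_cons]
      have hstep : CompteurMotsLettresStep (acc ++ [n], acc.length) c
          = (acc ++ [n + 1], acc.length) := by
        simp only [CompteurMotsLettresStep, ne_eq, hc, not_false_eq_true, if_pos]
        rw [pvGetD_last, pvSet_last]
      rw [hstep, ih acc (n + 1), pvSegs_cons_nonspace c cs hc, pvBump_bump,
        pvSplitOn_cons_nonspace c cs hc]

-- ===== VERDICT (by name: the statement is the Claim_ definition above) =====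
theorem CompteurMotsLettres_spec : Claim_equal_CompteurMotsLettres := by
  intro s _
  unfold Spec_CompteurMotsLettres CompteurMotsLettres CompteurMotsLettres_alt
  have h := pvLoop s.toList [] 0
  simp only [List.nil_append, List.length_nil, Nat.zero_add] at h
  rw [h]
  have h1 : 1 ≤ (s.toList.splitOn ' ').length :=
    List.length_pos_of_ne_nil (pvSplitOn_ne_nil s.toList)
  cases hs : pvSegs s.toList with
  | nil => exact absurd hs (pvSegs_ne_nil s.toList)
  | cons x xs =>
    simp only [pvBump, Int.zero_add, Prod.mk.injEq]
    refine ⟨?_, ?_⟩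
    · omega
    · simpa [pvSegs] using hs.symm
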